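-- pv_equiv track=rewrite | github.com/sandbox-pokhara/oas-client | oas_client/utils.py | render_imports
-- ===== SOURCE A (Python) =====
-- from collections import defaultdict
--
-- def render_imports(imports: set[tuple[str, str]]):
--     """
--     Groups and sorts imports and prints Python import statements.
--     Each import is a tuple of (module, item), e.g. ("os", "path"), ("os", "mkdir").
--
--     Prints:
--         Statements like: from module import item1, item2
--     """
--     grouped = defaultdict[str, list[str]](list)
--
--     for module, item in imports:
--         grouped[module].append(item)
--
--     output: list[str] = []
--     for module in sorted(grouped):
--         items = sorted(grouped[module])
--         output.append(f"from {module} import {', '.join(items)}")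
--
--     return "\n".join(output)
-- ===== SOURCE B (Python) =====
-- from itertools import groupby
--
--
-- def render_imports(imports):
--     lines = []
--     for module, group in groupby(sorted(imports), key=lambda t: t[0]):
--         items = ", ".join(item for _, item in group)
--         lines.append(f"from {module} import {items}")
--     return "\n".join(lines)
-- ===== Notes on version B (the rewrite author's own statement) =====
-- stated objective: idiomatic
-- what changed: Replaces the defaultdict grouping pass plus per-module sorts with one whole-list sort followed by itertools.groupby over consecutive modules (the tuple sort already orders items within each module).
import Mathlib
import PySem

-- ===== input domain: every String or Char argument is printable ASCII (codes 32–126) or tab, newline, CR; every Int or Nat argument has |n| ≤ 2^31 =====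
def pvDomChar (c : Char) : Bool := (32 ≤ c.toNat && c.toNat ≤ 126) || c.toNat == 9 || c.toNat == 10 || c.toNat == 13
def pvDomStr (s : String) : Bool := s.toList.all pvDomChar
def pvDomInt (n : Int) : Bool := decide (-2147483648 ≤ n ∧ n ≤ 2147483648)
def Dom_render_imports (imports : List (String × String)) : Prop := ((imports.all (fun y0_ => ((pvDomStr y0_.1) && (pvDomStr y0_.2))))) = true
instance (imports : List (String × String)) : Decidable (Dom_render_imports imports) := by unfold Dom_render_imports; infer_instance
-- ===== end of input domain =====

-- B replaces A's defaultdict grouping pass plus per-module sorts by one whole-list tuple sort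
-- followed by a groupby over consecutive equal modules (idiomatic itertools decomposition).

-- ===== PORT A =====
def render_imports (imports : List (String × String)) : String :=
  let grouped : PySem.Dict String (List String) :=
    imports.foldl (fun d p => d.modify p.1 [] (fun is => is ++ [p.2])) PySem.Dict.empty
  let output : List String :=
    (PySem.List.sorted grouped.keys (fun m => m)).foldl
      (fun out m =>
        out ++ ["from " ++ m ++ " import " ++
          PySem.Str.join ", " (PySem.List.sorted (grouped.getD m []) (fun i => i))]) []
  PySem.Str.join "\n" output

-- ===== PORT B =====
-- itertools.groupby over the sorted list: split into maximal runs of consecutive equal modules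
def pvGroupRuns : List (String × String) → List (String × List String)
  | [] => []
  | (m, i) :: rest =>
    match pvGroupRuns rest with
    | (m', is) :: t => if m = m' then (m, i :: is) :: t else (m, [i]) :: (m', is) :: t
    | [] => [(m, [i])]

def render_imports_alt (imports : List (String × String)) : String :=
  let lines : List String :=
    (pvGroupRuns (PySem.List.sorted2 imports (fun t => t.1) (fun t => t.2))).map
      (fun g => "from " ++ g.1 ++ " import " ++ PySem.Str.join ", " g.2)
  PySem.Str.join "\n" lines

-- ===== PRECONDITION & SPEC =====
def Spec_render_imports (imports : List (String × String)) (out : String) : Prop := out = render_imports_alt imports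
instance (imports : List (String × String)) (out : String) : Decidable (Spec_render_imports imports out) := by unfold Spec_render_imports; infer_instance

-- ===== CLAIM (what is proved, stated in full; the proofs are below) =====
def Claim_equal_render_imports : Prop := ∀ (imports : List (String × String)), Dom_render_imports imports → Spec_render_imports imports (render_imports imports)

-- ===== LEMMAS AND PROOFS =====

-- Python's tuple comparison: non-strict lexicographic order on pairs of strings
def pvLexLe (a b : String × String) : Prop := a.1 < b.1 ∨ (a.1 = b.1 ∧ a.2 ≤ b.2)

theorem pvLexLe_trans {a b c : String × String} (h : pvLexLe a b) (h' : pvLexLe b c) : pvLexLe a c := by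
  rcases h with h | ⟨h1, h2⟩ <;> rcases h' with h' | ⟨h1', h2'⟩
  · exact Or.inl (lt_trans h h')
  · exact Or.inl (h1' ▸ h)
  · exact Or.inl (h1 ▸ h')
  · exact Or.inr ⟨h1.trans h1', le_trans h2 h2'⟩

theorem pvLexLe_antisymm (a b : String × String) (h : pvLexLe a b) (h' : pvLexLe b a) : a = b := by
  rcases h with h | ⟨h1, h2⟩ <;> rcases h' with h' | ⟨h1', h2'⟩
  · exact absurd h' (lt_asymm h)
  · exact absurd h (h1' ▸ lt_irrefl _)
  · exact absurd h' (h1 ▸ lt_irrefl _)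
  · exact Prod.ext h1 (le_antisymm h2 h2')

theorem pvBefore_true {a b : String × String}
    (h : (decide (a.1 < b.1) || !decide (b.1 < a.1) && decide (a.2 < b.2)) = true) : pvLexLe a b := by
  simp only [Bool.or_eq_true, Bool.and_eq_true, Bool.not_eq_true', decide_eq_true_eq,
    decide_eq_false_iff_not] at h
  rcases h with h | ⟨h1, h2⟩
  · exact Or.inl h
  · rcases lt_or_eq_of_le (not_lt.mp h1) with h' | h'
    · exact Or.inl h'
    · exact Or.inr ⟨h', le_of_lt h2⟩

theorem pvBefore_false {a b : String × String}
    (h : (decide (a.1 < b.1) || !decide (b.1 < a.1) && decide (a.2 < b.2)) = false) : pvLexLe b a := by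
  simp only [Bool.or_eq_false_iff, Bool.and_eq_false_iff, Bool.not_eq_false',
    decide_eq_true_eq, decide_eq_false_iff_not] at h
  obtain ⟨h1, h2⟩ := h
  rcases h2 with h2 | h2
  · exact Or.inl h2
  · rcases lt_or_eq_of_le (not_lt.mp h1) with h' | h'
    · exact Or.inl h'
    · exact Or.inr ⟨h', not_lt.mp h2⟩

theorem pairwise_insertBy (before : String × String → String × String → Bool)
    (h1 : ∀ a b, before a b = true → pvLexLe a b)
    (h2 : ∀ a b, before a b = false → pvLexLe b a)
    (x : String × String) (ys : List (String × String)) (hys : ys.Pairwise pvLexLe) :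
    (PySem.List.insertBy before x ys).Pairwise pvLexLe := by
  induction ys with
  | nil => simp [PySem.List.insertBy]
  | cons y ys ih =>
    rcases hys with - | ⟨hy, hys'⟩
    cases hb : before x y with
    | true =>
      simp only [PySem.List.insertBy, hb, if_true]
      refine List.Pairwise.cons ?_ (List.Pairwise.cons hy hys')
      intro z hz
      rcases List.mem_cons.mp hz with rfl | hz
      · exact h1 x z hb
      · exact pvLexLe_trans (h1 x y hb) (hy z hz)
    | false =>
      simp only [PySem.List.insertBy, hb]
      refine List.Pairwise.cons ?_ (ih hys')
      intro z hz
      rcases (PySem.List.mem_insertBy before x z ys).mp hz with rfl | hz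
      · exact h2 z y hb
      · exact hy z hz

theorem sorted2_pairwise_lex (l : List (String × String)) :
    (PySem.List.sorted2 l (fun t => t.1) (fun t => t.2)).Pairwise pvLexLe := by
  show (l.foldl (fun acc x => PySem.List.insertBy
      (fun a b => decide (a.1 < b.1) || !decide (b.1 < a.1) && decide (a.2 < b.2)) x acc) []).Pairwise pvLexLe
  suffices h : ∀ (l : List (String × String)) (acc : List (String × String)), acc.Pairwise pvLexLe →
      (l.foldl (fun acc x => PySem.List.insertBy
        (fun a b => decide (a.1 < b.1) || !decide (b.1 < a.1) && decide (a.2 < b.2)) x acc) acc).Pairwise pvLexLe by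
    exact h l [] (List.Pairwise.nil)
  intro l
  induction l with
  | nil => intro acc h; simpa using h
  | cons x l ih =>
    intro acc h
    exact ih _ (pairwise_insertBy _ (fun a b => pvBefore_true) (fun a b => pvBefore_false) x acc h)

def pvExpand (gs : List (String × List String)) : List (String × String) :=
  gs.flatMap (fun g => g.2.map (fun i => (g.1, i)))

def pvGroups (l : List (String × String)) : List (String × List String) :=
  (PySem.List.sorted (PySem.Set.ofList (l.map (fun p => p.1))) (fun m => m)).map
    (fun m => (m, PySem.List.sorted ((l.filter (fun p => p.1 == m)).map (fun p => p.2)) (fun i => i)))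

theorem runs_head (p : String × String) (l : List (String × String)) :
    ∃ is t, pvGroupRuns (p :: l) = (p.1, is) :: t := by
  obtain ⟨m, i⟩ := p
  cases h : pvGroupRuns l with
  | nil => exact ⟨[i], [], by simp [pvGroupRuns, h]⟩
  | cons g t =>
    obtain ⟨m', is⟩ := g
    by_cases hm : m = m'
    · exact ⟨i :: is, t, by simp [pvGroupRuns, h, hm]⟩
    · exact ⟨[i], (m', is) :: t, by simp [pvGroupRuns, h, hm]⟩

theorem runs_group (m : String) (i0 : String) (is : List String) (l : List (String × String))
    (hl : ∀ q ∈ l.head?, q.1 ≠ m) :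
    pvGroupRuns ((i0 :: is).map (fun i => (m, i)) ++ l) = (m, i0 :: is) :: pvGroupRuns l := by
  induction is generalizing i0 with
  | nil =>
    cases l with
    | nil => simp [pvGroupRuns]
    | cons q l' =>
      obtain ⟨is', t, h⟩ := runs_head q l'
      have hq : q.1 ≠ m := hl q (by simp)
      rw [show pvGroupRuns ((i0 :: []).map (fun i => (m, i)) ++ q :: l') =
          (match pvGroupRuns (q :: l') with
           | (m', is) :: t => if m = m' then (m, i0 :: is) :: t else (m, [i0]) :: (m', is) :: t
           | [] => [(m, [i0])]) from rfl, h]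
      simp [Ne.symm hq]
  | cons i1 is ih =>
    have h := ih i1
    simp only [List.map_cons, List.cons_append] at h ⊢
    rw [show pvGroupRuns ((m, i0) :: ((m, i1) :: (is.map (fun i => (m, i)) ++ l))) =
        (match pvGroupRuns ((m, i1) :: (is.map (fun i => (m, i)) ++ l)) with
         | (m', is) :: t => if m = m' then (m, i0 :: is) :: t else (m, [i0]) :: (m', is) :: t
         | [] => [(m, [i0])]) from rfl, h]
    simp

theorem head?_expand_fst {q : String × String} {gs : List (String × List String)}
    (h : q ∈ (pvExpand gs).head?) : ∃ g ∈ gs, q.1 = g.1 := by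
  have hmem : q ∈ pvExpand gs := by
    cases he : pvExpand gs with
    | nil => simp [he] at h
    | cons a t => simp [he] at h; simp [h]
  obtain ⟨g, hg, hq⟩ := List.mem_flatMap.mp hmem
  obtain ⟨i, _, rfl⟩ := List.mem_map.mp hq
  exact ⟨g, hg, rfl⟩

theorem runs_expand (gs : List (String × List String)) (hne : ∀ g ∈ gs, g.2 ≠ [])
    (hmods : gs.Pairwise (fun g h => g.1 ≠ h.1)) :
    pvGroupRuns (pvExpand gs) = gs := by
  induction gs with
  | nil => rfl
  | cons g gs ih =>
    obtain ⟨m, is⟩ := g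
    rcases hmods with - | ⟨hm, hmods'⟩
    cases his : is with
    | nil => exact absurd his (hne (m, is) (by simp))
    | cons i0 is' =>
      subst his
      rw [show pvExpand ((m, i0 :: is') :: gs) = (i0 :: is').map (fun i => (m, i)) ++ pvExpand gs by
        simp [pvExpand]]
      rw [runs_group m i0 is' (pvExpand gs) ?_]
      · rw [ih (fun g hg => hne g (by simp [hg])) hmods']
      · intro q hq
        obtain ⟨g', hg', hq1⟩ := head?_expand_fst hq
        have := hm g' hg'
        exact fun hc => this (hc.symm.trans hq1)

theorem flatMap_perm_congr {α β : Type} (ms : List α) (f g : α → List β)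
    (h : ∀ m ∈ ms, (f m).Perm (g m)) : (ms.flatMap f).Perm (ms.flatMap g) := by
  induction ms with
  | nil => simp
  | cons m ms ih =>
    simp only [List.flatMap_cons]
    exact (h m (by simp)).append (ih (fun m hm => h m (by simp [hm])))

theorem partition_perm (ms : List String) (l : List (String × String)) (hnd : ms.Nodup)
    (hcov : ∀ p ∈ l, p.1 ∈ ms) :
    (ms.flatMap (fun m => l.filter (fun p => p.1 == m))).Perm l := by
  induction ms generalizing l with
  | nil =>
    cases l with
    | nil => simp
    | cons p l' => exact absurd (hcov p (by simp)) (by simp)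
  | cons m ms ih =>
    rcases hnd with - | ⟨hm, hnd'⟩
    simp only [List.flatMap_cons]
    have hrest : ∀ m' ∈ ms, l.filter (fun p => p.1 == m') =
        (l.filter (fun p => !(p.1 == m))).filter (fun p => p.1 == m') := by
      intro m' hm'
      rw [List.filter_filter]
      refine (List.filter_congr ?_).symm
      intro p _
      by_cases hp : p.1 = m'
      · simp [hp]
        exact fun hc => hm m' hm' hc.symm
      · simp [hp]
    have hmap : ms.flatMap (fun m' => l.filter (fun p => p.1 == m')) =
        ms.flatMap (fun m' => (l.filter (fun p => !(p.1 == m))).filter (fun p => p.1 == m')) := by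
      apply List.flatMap_congr
      intro m' hm'
      exact hrest m' hm'
    rw [hmap]
    have ihp := ih (l.filter (fun p => !(p.1 == m))) hnd' ?_
    · exact (ihp.append_left _).trans (by simpa using List.filter_append_perm (fun p => p.1 == m) l)
    · intro p hp
      have h1 := List.of_mem_filter hp
      have h2 := hcov p (List.mem_of_mem_filter hp)
      simp only [Bool.not_eq_true', beq_eq_false_iff_ne, ne_eq] at h1
      rcases List.mem_cons.mp h2 with hc | hc
      · exact absurd hc h1
      · exact hc

theorem filter_fst_map (m : String) (l : List (String × String)) :
    ((l.filter (fun p => p.1 == m)).map (fun p => p.2)).map (fun i => (m, i)) =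
      l.filter (fun p => p.1 == m) := by
  rw [List.map_map]
  refine List.map_congr_left ?_ |>.trans (List.map_id _)
  intro p hp
  have := List.of_mem_filter hp
  simp only [beq_iff_eq] at this
  simp [Function.comp, this.symm]

theorem expand_groups_eq (l : List (String × String)) :
    pvExpand (pvGroups l) =
      (PySem.List.sorted (PySem.Set.ofList (l.map (fun p => p.1))) (fun m => m)).flatMap
        (fun m => (PySem.List.sorted ((l.filter (fun p => p.1 == m)).map (fun p => p.2)) (fun i => i)).map
          (fun i => (m, i))) := by
  simp [pvExpand, pvGroups, List.flatMap_map]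

theorem expand_perm (l : List (String × String)) : (pvExpand (pvGroups l)).Perm l := by
  rw [expand_groups_eq]
  have hms : ∀ p ∈ l, p.1 ∈ PySem.List.sorted (PySem.Set.ofList (l.map (fun p => p.1))) (fun m => m) := by
    intro p hp
    rw [PySem.List.mem_sorted, PySem.Set.mem_ofList]
    exact List.mem_map.mpr ⟨p, hp, rfl⟩
  have hnd : (PySem.List.sorted (PySem.Set.ofList (l.map (fun p => p.1))) (fun m => m)).Nodup :=
    (PySem.List.sorted_perm _ _ false).symm.nodup (PySem.Set.nodup_ofList _)
  refine List.Perm.trans ?_ (partition_perm _ l hnd hms)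
  apply flatMap_perm_congr
  intro m _
  have : (PySem.List.sorted ((l.filter (fun p => p.1 == m)).map (fun p => p.2)) (fun i => i)).Perm
      ((l.filter (fun p => p.1 == m)).map (fun p => p.2)) := PySem.List.sorted_perm _ _ false
  exact (this.map _).trans (by rw [filter_fst_map])

theorem expand_sorted (l : List (String × String)) :
    (pvExpand (pvGroups l)).Pairwise pvLexLe := by
  rw [expand_groups_eq]
  rw [List.pairwise_flatMap]
  constructor
  · intro m _
    rw [List.pairwise_map]
    refine (PySem.List.sorted_pairwise _ (fun i => i)).imp ?_
    intro i j hij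
    exact Or.inr ⟨rfl, hij⟩
  · refine (PySem.List.sorted_ofList_pairwise_lt _).imp ?_
    intro m₁ m₂ h12 x hx y hy
    obtain ⟨i, _, rfl⟩ := List.mem_map.mp hx
    obtain ⟨j, _, rfl⟩ := List.mem_map.mp hy
    exact Or.inl h12

theorem sorted2_eq_expand (l : List (String × String)) :
    PySem.List.sorted2 l (fun t => t.1) (fun t => t.2) = pvExpand (pvGroups l) :=
  List.eq_of_perm_of_sorted (fun a b _ _ => pvLexLe_antisymm a b)
    (sorted2_pairwise_lex l) (expand_sorted l)
    ((PySem.List.sorted2_perm l _ _ false).trans (expand_perm l).symm)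

theorem runs_sorted2 (l : List (String × String)) :
    pvGroupRuns (PySem.List.sorted2 l (fun t => t.1) (fun t => t.2)) = pvGroups l := by
  rw [sorted2_eq_expand]
  unfold pvGroups
  apply runs_expand
  · intro g hg
    obtain ⟨m, hm, rfl⟩ := List.mem_map.mp hg
    have hmem : m ∈ l.map (fun p => p.1) := by
      rw [PySem.List.mem_sorted, PySem.Set.mem_ofList] at hm; exact hm
    obtain ⟨p, hp, rfl⟩ := List.mem_map.mp hmem
    intro hc
    rw [PySem.List.sorted_eq_nil_iff, List.map_eq_nil_iff, List.filter_eq_nil_iff] at hc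
    exact hc p hp (by simp)
  · rw [List.pairwise_map]
    exact (PySem.List.sorted_ofList_pairwise_lt _).imp (fun h => ne_of_lt h)

theorem foldl_append_map {α β : Type} (ms : List α) (f : α → β) (acc : List β) :
    ms.foldl (fun out m => out ++ [f m]) acc = acc ++ ms.map f := by
  induction ms generalizing acc with
  | nil => simp
  | cons m ms ih => simp [ih]

-- ===== VERDICT (by name: the statement is the Claim_ definition above) =====
theorem render_imports_spec : Claim_equal_render_imports := by
  intro l _
  unfold Spec_render_imports render_imports render_imports_alt
  rw [runs_sorted2]
  have hkeys : (l.foldl (fun d p => d.modify p.1 [] (fun is => is ++ [p.2]))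
      (PySem.Dict.empty : PySem.Dict String (List String))).keys =
      PySem.Set.ofList (l.map (fun p => p.1)) := by
    simpa using PySem.Dict.keys_foldl_modify_key l (fun p => p.1) []
      (fun _ p is => is ++ [p.2]) PySem.Dict.empty
  have hgetD : ∀ m, (l.foldl (fun d p => d.modify p.1 [] (fun is => is ++ [p.2]))
      (PySem.Dict.empty : PySem.Dict String (List String))).getD m [] =
      (l.filter (fun p => p.1 == m)).map (fun p => p.2) := by
    intro m
    simpa using PySem.Dict.getD_foldl_modify_append l PySem.Dict.empty m
  simp only [hkeys, hgetD, foldl_append_map, List.nil_append, pvGroups, List.map_map]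
  rfl
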